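-- pv_equiv track=rewrite | github.com/itscomputers/ebe-python | numth/primality_lucas.py | _by_index
-- ===== SOURCE A (Python) =====
-- def _double_index(U, V, Q_k, mod):
--     return (U*V) % mod, (V*V - 2*Q_k) % mod, pow(Q_k, 2, mod)
--
-- def _index_plus_one(U, V, Q_k, P, Q, mod):
--     return (
--         ((P*U + V) * (mod + 1) // 2) % mod,
--         (((P**2 - 4*Q) * U + P*V) * (mod + 1) // 2) % mod,
--         (Q_k * Q) % mod
--     )
--
-- def _by_index(k, P, Q, mod):
--     if k == 0:
--         return (0, 2, 1)
--     elif k == 1: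
--         return (1, P % mod, Q % mod)
--     elif k % 2 == 0:
--         return _double_index(*_by_index(k//2, P, Q, mod), mod)
--     else:
--         return _index_plus_one(*_by_index(k-1, P, Q, mod), P, Q, mod)
-- ===== SOURCE B (Python) =====
-- def _by_index(k, P, Q, mod):
--     if k == 0:
--         return (0, 2, 1)
--     U, V, Qk = 1, P % mod, Q % mod
--     for i in range(k.bit_length() - 2, -1, -1):
--         U, V, Qk = (U * V) % mod, (V * V - 2 * Qk) % mod, pow(Qk, 2, mod)
--         if (k >> i) & 1:
--             U, V, Qk = (
--                 ((P * U + V) * (mod + 1) // 2) % mod,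
--                 (((P * P - 4 * Q) * U + P * V) * (mod + 1) // 2) % mod,
--                 (Qk * Q) % mod,
--             )
--     return (U, V, Qk)
-- ===== Notes on version B (the rewrite author's own statement) =====
-- stated objective: alternative
-- what changed: Replaces A's top-down recursion on k (halve when even, decrement when odd) by a single iterative MSB-first binary ladder over k's bits with the doubling/plus-one step formulas inlined.
import Mathlib
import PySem

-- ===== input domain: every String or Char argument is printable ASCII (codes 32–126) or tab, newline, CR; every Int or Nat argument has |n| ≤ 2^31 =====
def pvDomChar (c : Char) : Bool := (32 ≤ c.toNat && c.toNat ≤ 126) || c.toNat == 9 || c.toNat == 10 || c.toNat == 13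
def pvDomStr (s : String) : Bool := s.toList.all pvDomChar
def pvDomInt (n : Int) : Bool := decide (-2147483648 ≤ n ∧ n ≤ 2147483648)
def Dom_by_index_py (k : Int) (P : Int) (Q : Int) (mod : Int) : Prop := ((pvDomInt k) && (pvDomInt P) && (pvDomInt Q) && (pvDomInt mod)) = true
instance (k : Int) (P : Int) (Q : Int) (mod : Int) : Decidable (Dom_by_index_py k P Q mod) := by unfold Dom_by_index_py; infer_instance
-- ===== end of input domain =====

-- B replaces A's top-down recursion on k by a single MSB-first binary ladder over k's bits (objective: alternative decomposition, same cost).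

-- ===== PORT A =====
-- _double_index
def pyDoubleIndex (U V Qk mod : Int) : Int × Int × Int :=
  (PySem.Int.mod (U * V) mod, PySem.Int.mod (V * V - 2 * Qk) mod, PySem.Int.powMod Qk 2 mod)

-- _index_plus_one
def pyIndexPlusOne (U V Qk P Q mod : Int) : Int × Int × Int :=
  (PySem.Int.mod (PySem.Int.floordiv ((P * U + V) * (mod + 1)) 2) mod,
   PySem.Int.mod (PySem.Int.floordiv (((P ^ 2 - 4 * Q) * U + P * V) * (mod + 1)) 2) mod,
   PySem.Int.mod (Qk * Q) mod)

-- A's recursion, with a fuel guard for totality only (inside Pre_ the fuel k.toNat + 1 never runs out)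
def byIndexGo : Nat → Int → Int → Int → Int → Int × Int × Int
  | 0, _, _, _, _ => (0, 2, 1)
  | fuel + 1, k, P, Q, mod =>
    if k = 0 then (0, 2, 1)
    else if k = 1 then (1, PySem.Int.mod P mod, PySem.Int.mod Q mod)
    else if PySem.Int.mod k 2 = 0 then
      let s := byIndexGo fuel (PySem.Int.floordiv k 2) P Q mod
      pyDoubleIndex s.1 s.2.1 s.2.2 mod
    else
      let s := byIndexGo fuel (k - 1) P Q mod
      pyIndexPlusOne s.1 s.2.1 s.2.2 P Q mod

def by_index_py (k : Int) (P : Int) (Q : Int) (mod : Int) : Int × Int × Int :=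
  byIndexGo (k.toNat + 1) k P Q mod

-- ===== PORT B =====
-- one ladder iteration: double, and when the bit is set also plus-one (formulas inlined as in Source B)
def altStep (P Q mod : Int) (st : Int × Int × Int) (bit : Bool) : Int × Int × Int :=
  let U := PySem.Int.mod (st.1 * st.2.1) mod
  let V := PySem.Int.mod (st.2.1 * st.2.1 - 2 * st.2.2) mod
  let Qk := PySem.Int.powMod st.2.2 2 mod
  if bit then
    (PySem.Int.mod (PySem.Int.floordiv ((P * U + V) * (mod + 1)) 2) mod,
     PySem.Int.mod (PySem.Int.floordiv (((P * P - 4 * Q) * U + P * V) * (mod + 1)) 2) mod,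
     PySem.Int.mod (Qk * Q) mod)
  else (U, V, Qk)

-- the bits (k >> i) & 1 for i = bit_length-2 .. 0, most significant first
def altBits (k : Int) : List Bool :=
  (List.range (PySem.Int.bitLength k - 1)).reverse.map
    (fun i : Nat => PySem.Int.band (k >>> (i : Int)) 1 == 1)

def by_index_py_alt (k : Int) (P : Int) (Q : Int) (mod : Int) : Int × Int × Int :=
  if k = 0 then (0, 2, 1)
  else (altBits k).foldl (altStep P Q mod) (1, PySem.Int.mod P mod, PySem.Int.mod Q mod)

-- ===== PRECONDITION & SPEC =====
-- Pre_ excludes k < 0 (A's recursion never terminates: RecursionError) and mod = 0 with k ≥ 1 (A raises ZeroDivisionError at '% mod').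
def Pre_by_index_py (k : Int) (P : Int) (Q : Int) (mod : Int) : Prop := 0 ≤ k ∧ (k = 0 ∨ mod ≠ 0)
instance (k : Int) (P : Int) (Q : Int) (mod : Int) : Decidable (Pre_by_index_py k P Q mod) := by unfold Pre_by_index_py; infer_instance
def pvWitness_by_index_py : Int × Int × Int × Int := (13, 3, -1, 7)

def Spec_by_index_py (k : Int) (P : Int) (Q : Int) (mod : Int) (out : Int × Int × Int) : Prop := out = by_index_py_alt k P Q mod
instance (k : Int) (P : Int) (Q : Int) (mod : Int) (out : Int × Int × Int) : Decidable (Spec_by_index_py k P Q mod out) := by unfold Spec_by_index_py; infer_instance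

-- ===== CLAIM (what is proved, stated in full; the proofs are below) =====
def Claim_equal_by_index_py : Prop := ∀ (k : Int) (P : Int) (Q : Int) (mod : Int), Dom_by_index_py k P Q mod → Pre_by_index_py k P Q mod → Spec_by_index_py k P Q mod (by_index_py k P Q mod)

-- ===== LEMMAS AND PROOFS =====

-- the low bit of ↑n read the way B reads it
lemma bit0_eq (n : Nat) : (PySem.Int.band (n : Int) 1 == 1) = decide (n % 2 = 1) := by
  have h1 : ((1 : Int)) = ((1 : Nat) : Int) := rfl
  rw [h1, PySem.Int.band_natCast, Nat.and_one_is_mod]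
  rcases Nat.mod_two_eq_zero_or_one n with h | h <;> simp [h]

-- the (i+1)-th bit of n is the i-th bit of n / 2
lemma shift_succ (n i : Nat) : ((n : Int) >>> (((i + 1) : Nat) : Int)) = (((n / 2 : Nat) : Int) >>> ((i : Nat) : Int)) := by
  rw [Int.shiftRight_natCast, Int.shiftRight_natCast]
  have : n >>> (i + 1) = (n / 2) >>> i := by
    rw [Nat.add_comm i 1, Nat.shiftRight_add, Nat.shiftRight_one]
  rw [this]

-- peeling the last bit off altBits
lemma altBits_step (n : Nat) (h2 : 2 ≤ n) :
    altBits (n : Int) = altBits ((n / 2 : Nat) : Int) ++ [decide (n % 2 = 1)] := by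
  have hL : PySem.Int.bitLength (n : Int) = PySem.Int.bitLength ((n / 2 : Nat) : Int) + 1 :=
    PySem.Int.bitLength_natCast (by omega : 0 < n)
  obtain ⟨L', hL'⟩ : ∃ L', PySem.Int.bitLength ((n / 2 : Nat) : Int) = L' + 1 :=
    ⟨_, PySem.Int.bitLength_natCast (by omega : 0 < n / 2)⟩
  unfold altBits
  rw [hL, hL']
  simp only [Nat.add_sub_cancel]
  rw [List.range_succ_eq_map, List.reverse_cons, List.map_append]
  congr 1
  · rw [List.map_reverse, List.map_reverse, List.map_map]
    congr 1
    apply List.map_congr_left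
    intro i _
    simp only [Function.comp_apply, Nat.succ_eq_add_one, shift_succ]
  · simp [bit0_eq n]

-- A's recursion computes B's ladder (n ≥ 1, enough fuel)
lemma go_eq (P Q mod : Int) : ∀ (n : Nat), 1 ≤ n → ∀ fuel, n ≤ fuel →
    byIndexGo fuel (n : Int) P Q mod
      = (altBits (n : Int)).foldl (altStep P Q mod) (1, PySem.Int.mod P mod, PySem.Int.mod Q mod) := by
  intro n
  induction n using Nat.strong_induction_on with
  | _ n ih =>
    intro h1 fuel hf
    match fuel with
    | 0 => omega
    | f + 1 =>
      by_cases hn1 : n = 1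
      · subst hn1
        have hb : PySem.Int.bitLength (1 : Int) = 1 := by decide
        simp only [Nat.cast_one]
        simp [byIndexGo, altBits, hb]
      · have h2 : 2 ≤ n := by omega
        have hne0 : ((n : Nat) : Int) ≠ 0 := by exact_mod_cast (by omega : n ≠ 0)
        have hne1 : ((n : Nat) : Int) ≠ 1 := by exact_mod_cast hn1
        have hmod : PySem.Int.mod (n : Int) 2 = ((n % 2 : Nat) : Int) := by
          exact_mod_cast PySem.Int.mod_natCast n 2
        have hdiv : PySem.Int.floordiv (n : Int) 2 = ((n / 2 : Nat) : Int) := by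
          exact_mod_cast PySem.Int.floordiv_natCast n 2
        rw [byIndexGo, if_neg hne0, if_neg hne1]
        by_cases hpar : n % 2 = 0
        · rw [if_pos (by rw [hmod, hpar]; rfl), hdiv,
              ih (n / 2) (by omega) (by omega) f (by omega),
              altBits_step n h2, List.foldl_append]
          simp [hpar, altStep, pyDoubleIndex]
        · have hpar1 : n % 2 = 1 := by omega
          rw [if_neg (by rw [hmod, hpar1]; decide)]
          have hsub : ((n : Nat) : Int) - 1 = ((n - 1 : Nat) : Int) := by push_cast [h1]; ring
          rw [hsub, ih (n - 1) (by omega) (by omega) f (by omega)]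
          have e1 : altBits ((n - 1 : Nat) : Int)
              = altBits ((n / 2 : Nat) : Int) ++ [false] := by
            rw [altBits_step (n - 1) (by omega)]
            have hd : (n - 1) / 2 = n / 2 := by omega
            rw [hd]
            simp [(by omega : (n - 1) % 2 = 0)]
          have e2 : altBits ((n : Nat) : Int)
              = altBits ((n / 2 : Nat) : Int) ++ [true] := by
            rw [altBits_step n h2]; simp [hpar1]
          rw [e1, e2, List.foldl_append, List.foldl_append]
          simp [altStep, pyIndexPlusOne, pow_two]

-- ===== VERDICT (by name: the statement is the Claim_ definition above) =====
theorem by_index_py_spec : Claim_equal_by_index_py := by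
  intro k P Q mod _ hpre
  obtain ⟨hk, _⟩ := hpre
  unfold Spec_by_index_py by_index_py by_index_py_alt
  by_cases h0 : k = 0
  · subst h0; rfl
  · have hk1 : 1 ≤ k.toNat := by omega
    have hcast : ((k.toNat : Nat) : Int) = k := Int.toNat_of_nonneg hk
    rw [if_neg h0, ← hcast]
    exact go_eq P Q mod k.toNat hk1 (k.toNat + 1) (by omega)
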